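-- pv_equiv track=rewrite | github.com/larpix/larpix-10x10-scripts | multi_trigger_rate_qc.py | get_parallel_groups
-- ===== SOURCE A (Python) =====
-- def get_parallel_groups(chip_key_dict):
--     #sort by io group, ioc
--     groups = []
--     ctr = 0
--     while True:
--         current_group = []
--         for key in chip_key_dict:
--             if ctr >= len(chip_key_dict[key]): continue
--             current_group.append(chip_key_dict[key][ctr])
--         ctr += 1
--         if len(current_group)==0: break
--         groups.append(current_group)
--     return groups
-- ===== SOURCE B (Python) =====
-- def get_parallel_groups(chip_key_dict):
--     # Row-major distribution: walk each value list once, dropping element i into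
--     # groups[i] (creating the group on first touch); no per-position rescan of keys.
--     groups = []
--     for v in chip_key_dict.values():
--         for i, x in enumerate(v):
--             if i == len(groups):
--                 groups.append([])
--             groups[i].append(x)
--     return groups
-- ===== Notes on version B (the rewrite author's own statement) =====
-- stated objective: alternative
-- what changed: A builds the result column by column, rescanning every dict key at each position; B builds it row by row in a single pass over each value list, distributing element i into groups[i], so no column scan and no termination probe exist at all.
import Mathlib
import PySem

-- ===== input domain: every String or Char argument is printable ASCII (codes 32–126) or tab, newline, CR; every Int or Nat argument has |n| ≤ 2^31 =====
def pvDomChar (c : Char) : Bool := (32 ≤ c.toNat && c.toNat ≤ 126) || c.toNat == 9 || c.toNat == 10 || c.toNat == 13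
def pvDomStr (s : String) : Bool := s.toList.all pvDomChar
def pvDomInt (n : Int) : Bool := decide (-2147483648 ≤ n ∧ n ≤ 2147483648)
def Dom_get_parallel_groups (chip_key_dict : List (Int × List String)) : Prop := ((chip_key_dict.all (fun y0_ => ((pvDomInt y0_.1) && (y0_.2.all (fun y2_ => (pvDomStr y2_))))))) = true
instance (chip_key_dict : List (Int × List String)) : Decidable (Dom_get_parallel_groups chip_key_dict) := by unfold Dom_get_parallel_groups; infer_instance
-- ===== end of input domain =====

-- B replaces A's column-by-column rescan of every dict key by a single row-major pass:
-- each value list is walked once and element i is distributed into groups[i].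


-- ===== PORT A =====
-- fuel bound for A's `while True` loop: one more than the longest value list
def pvMaxLen (ls : List (List String)) : Nat := ls.foldl (fun m l => max m l.length) 0

-- A's while-loop: at each ctr scan ALL dict entries, keep entries still long enough
def pvALoop : Nat → List (Int × List String) → Nat → List (List String)
  | 0, _, _ => []
  | fuel+1, items, ctr =>
    let current_group := items.foldl
      (fun acc kv => if kv.2.length ≤ ctr then acc else acc ++ [kv.2.getD ctr ""]) []
    if current_group = [] then []
    else current_group :: pvALoop fuel items (ctr+1)

def get_parallel_groups (chip_key_dict : List (Int × List String)) : List (List String) :=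
  let d := PySem.Dict.ofList chip_key_dict
  pvALoop (pvMaxLen d.values + 1) d.items 0

-- ===== PORT B =====
-- B's inner loop: drop the elements of one value list into groups[0], groups[1], …,
-- creating a fresh group when the index first reaches the end of `groups`
def pvMerge : List String → List (List String) → List (List String)
  | [], gs => gs
  | x :: xs, [] => [x] :: pvMerge xs []
  | x :: xs, g :: gs => (g ++ [x]) :: pvMerge xs gs

def get_parallel_groups_alt (chip_key_dict : List (Int × List String)) : List (List String) :=
  (PySem.Dict.ofList chip_key_dict).values.foldl (fun gs v => pvMerge v gs) []

-- ===== PRECONDITION & SPEC =====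
def Spec_get_parallel_groups (chip_key_dict : List (Int × List String)) (out : List (List String)) : Prop := out = get_parallel_groups_alt chip_key_dict
instance (chip_key_dict : List (Int × List String)) (out : List (List String)) : Decidable (Spec_get_parallel_groups chip_key_dict out) := by unfold Spec_get_parallel_groups; infer_instance

-- ===== CLAIM (what is proved, stated in full; the proofs are below) =====
def Claim_equal_get_parallel_groups : Prop := ∀ (chip_key_dict : List (Int × List String)), Dom_get_parallel_groups chip_key_dict → Spec_get_parallel_groups chip_key_dict (get_parallel_groups chip_key_dict)

-- ===== LEMMAS AND PROOFS =====

-- pad-zip of two group lists: pointwise (++), keeping the tail of the longer one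
def pvZip : List (List String) → List (List String) → List (List String)
  | [], cs => cs
  | gs, [] => gs
  | g :: gs, c :: cs => (g ++ c) :: pvZip gs cs

-- the transpose, built row by row
def pvSpec : List (List String) → List (List String)
  | [] => []
  | v :: vs => pvZip (v.map (fun x => [x])) (pvSpec vs)

theorem pvZip_nil_right (gs : List (List String)) : pvZip gs [] = gs := by
  cases gs <;> rfl

theorem pvZip_assoc (a b c : List (List String)) :
    pvZip (pvZip a b) c = pvZip a (pvZip b c) := by
  induction a generalizing b c with
  | nil => rfl
  | cons g a ih =>
    cases b with
    | nil => simp [pvZip]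
    | cons h b =>
      cases c with
      | nil => simp [pvZip, pvZip_nil_right]
      | cons k c => simp [pvZip, ih]

theorem pvMerge_eq_zip (v : List String) (gs : List (List String)) :
    pvMerge v gs = pvZip gs (v.map (fun x => [x])) := by
  induction v generalizing gs with
  | nil => cases gs <;> rfl
  | cons x xs ih =>
    cases gs with
    | nil => simp [pvMerge, pvZip, ih]
    | cons g gs => simp [pvMerge, pvZip, ih]

-- B's fold accumulates: result = accumulator pad-zipped with the transpose of the rest
theorem pvFold_eq_spec (vs : List (List String)) : ∀ gs : List (List String),
    vs.foldl (fun gs v => pvMerge v gs) gs = pvZip gs (pvSpec vs) := by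
  induction vs with
  | nil => intro gs; simp [pvSpec, pvZip_nil_right]
  | cons v vs ih =>
    intro gs
    rw [List.foldl_cons, ih, pvMerge_eq_zip, pvZip_assoc]
    rfl

-- pvSpec ignores empty rows
theorem pvSpec_filter (vs : List (List String)) :
    pvSpec (vs.filter (fun v => decide (0 < v.length))) = pvSpec vs := by
  induction vs with
  | nil => rfl
  | cons v vs ih =>
    cases v with
    | nil => simpa [pvSpec, pvZip] using ih
    | cons x t => simp [pvSpec, ih]

-- A's inner scan at position ctr collects exactly the ctr-th element of each
-- still-long-enough value list, in dict order.
theorem pvALoop_group (items : List (Int × List String)) (ctr : Nat) (acc : List String) :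
    items.foldl (fun acc kv => if kv.2.length ≤ ctr then acc else acc ++ [kv.2.getD ctr ""]) acc
      = acc ++ (((items.map (·.2)).filter (fun l => decide (ctr < l.length))).map
          (fun l => l.getD ctr "")) := by
  induction items generalizing acc with
  | nil => simp
  | cons kv rest ih =>
    simp only [List.foldl_cons, List.map_cons]
    by_cases h : kv.2.length ≤ ctr
    · rw [if_pos h, ih]; simp [Nat.not_lt.mpr h]
    · rw [if_neg h, ih]; simp [Nat.lt_of_not_le h]

theorem pvMaxLen_le (ls : List (List String)) : ∀ m : Nat,
    (∀ l ∈ ls, l.length ≤ ls.foldl (fun m l => max m l.length) m) ∧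
      m ≤ ls.foldl (fun m l => max m l.length) m := by
  induction ls with
  | nil => intro m; exact ⟨by simp, le_refl m⟩
  | cons l ls ih =>
    intro m
    refine ⟨?_, ?_⟩
    · intro u hu
      rcases List.mem_cons.mp hu with h | h
      · subst h
        exact le_trans (le_max_right m u.length) (ih (max m u.length)).2
      · exact (ih (max m l.length)).1 u h
    · exact le_trans (le_max_left m l.length) (ih (max m l.length)).2

-- filter/map bookkeeping: rows alive at position ctr, viewed after dropping ctr elements
theorem pvRows_eq (vs : List (List String)) (ctr : Nat) :
    (vs.map (fun l => l.drop ctr)).filter (fun l => decide (0 < l.length))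
      = (vs.filter (fun l => decide (ctr < l.length))).map (fun l => l.drop ctr) := by
  induction vs with
  | nil => rfl
  | cons l vs ih =>
    by_cases h : ctr < l.length
    · simp [h, Nat.sub_pos_of_lt h, ih]
    · have : l.length - ctr = 0 := Nat.sub_eq_zero_of_le (Nat.le_of_not_lt h)
      simp [h, this, ih]

-- all rows exhausted at position ctr: the transpose of the suffixes is empty
theorem pvSpec_nil (vs : List (List String)) (ctr : Nat)
    (h : vs.filter (fun l => decide (ctr < l.length)) = []) :
    pvSpec (vs.map (fun l => l.drop ctr)) = [] := by
  rw [← pvSpec_filter, pvRows_eq, h]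
  rfl

-- peeling one column off the row-built transpose of the suffixes
theorem pvCol_spec (vs : List (List String)) (ctr : Nat)
    (hcol : vs.filter (fun l => decide (ctr < l.length)) ≠ []) :
    pvSpec (vs.map (fun l => l.drop ctr))
      = ((vs.filter (fun l => decide (ctr < l.length))).map (fun l => l.getD ctr ""))
        :: pvSpec (vs.map (fun l => l.drop (ctr + 1))) := by
  induction vs with
  | nil => exact absurd rfl hcol
  | cons l vs ih =>
    by_cases h : ctr < l.length
    · have hdrop : l.drop ctr = l[ctr] :: l.drop (ctr + 1) :=
        List.drop_eq_getElem_cons h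
      have hg : l.getD ctr "" = l[ctr] := List.getD_eq_getElem l "" h
      by_cases hrest : vs.filter (fun l => decide (ctr < l.length)) = []
      · have hrest' : vs.filter (fun l => decide (ctr + 1 < l.length)) = [] := by
          apply List.filter_eq_nil_iff.mpr
          intro u hu
          have := List.filter_eq_nil_iff.mp hrest u hu
          simp at this ⊢
          omega
        rw [List.map_cons, pvSpec, pvSpec_nil vs ctr hrest, pvZip_nil_right, hdrop,
          List.map_cons, List.map_cons, pvSpec, pvSpec_nil vs (ctr + 1) hrest',
          pvZip_nil_right, List.filter_cons]
        simp [h, hrest]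
      · rw [List.map_cons, pvSpec, ih hrest, hdrop, List.map_cons, List.filter_cons]
        simp only [h, decide_true, if_true, List.map_cons, pvZip]
        rw [pvSpec]
        simp [List.getElem?_eq_getElem h]
    · have h0 : l.drop ctr = [] := List.drop_eq_nil_of_le (Nat.le_of_not_lt h)
      have h1 : l.drop (ctr + 1) = [] := List.drop_eq_nil_of_le (by omega)
      have hrest : vs.filter (fun l => decide (ctr < l.length)) ≠ [] := by
        intro hc
        apply hcol
        simp [h, hc]
      simp only [List.map_cons, h0, h1, pvSpec, pvZip, List.map_nil, List.filter_cons,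
        h, decide_false]
      exact ih hrest

-- A's column loop computes the row-built transpose of the suffixes, given enough fuel
theorem pvALoop_eq_spec (fuel : Nat) : ∀ (items : List (Int × List String)) (ctr : Nat),
    pvMaxLen (items.map (·.2)) ≤ ctr + fuel →
    pvALoop fuel items ctr = pvSpec ((items.map (·.2)).map (fun l => l.drop ctr)) := by
  induction fuel with
  | zero =>
    intro items ctr h
    rw [pvALoop, pvSpec_nil]
    apply List.filter_eq_nil_iff.mpr
    intro l hl
    have := le_trans ((pvMaxLen_le (items.map (·.2)) 0).1 l hl) h
    simp
    omega
  | succ fuel ih =>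
    intro items ctr h
    rw [pvALoop]
    simp only [pvALoop_group, List.nil_append]
    by_cases hcol : (items.map (·.2)).filter (fun l => decide (ctr < l.length)) = []
    · rw [if_pos (by rw [hcol]; rfl), pvSpec_nil _ _ hcol]
    · rw [if_neg (fun hmap => hcol (List.map_eq_nil_iff.mp hmap)),
        ih items (ctr + 1) (by omega), pvCol_spec _ _ hcol]

-- ===== VERDICT (by name: the statement is the Claim_ definition above) =====
theorem get_parallel_groups_spec : Claim_equal_get_parallel_groups := by
  intro chip_key_dict _
  unfold Spec_get_parallel_groups get_parallel_groups get_parallel_groups_alt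
  rw [pvFold_eq_spec]
  have hv : (PySem.Dict.ofList chip_key_dict).values
      = (PySem.Dict.ofList chip_key_dict).items.map (·.2) := rfl
  rw [pvALoop_eq_spec (pvMaxLen (PySem.Dict.ofList chip_key_dict).values + 1)
      (PySem.Dict.ofList chip_key_dict).items 0 (by rw [hv]; omega)]
  simp [pvZip, hv, Function.comp_def]
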